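-- pv_equiv track=rewrite | github.com/bogdanspbm/stereovision | Utils/MathUtils.py | findBorderExtremus
-- ===== SOURCE A (Python) =====
-- def findBorderExtremus(ext_arr, border_left=0, border_right=1920):
--     left_ext = None
--     right_ext = None
--
--     for ext in ext_arr[0]:
--         if ext[0] > border_left and (left_ext is None or left_ext[0] > ext[0]):
--             left_ext = ext
--         if ext[0] < border_right and (right_ext is None or right_ext[0] < ext[0]):
--             right_ext = ext
--
--     return left_ext, right_ext
-- ===== SOURCE B (Python) =====
-- def findBorderExtremus(ext_arr, border_left=0, border_right=1920):
--     # Sort-then-scan: stable-sort the row by x ascending and descending, then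
--     # take the first element beyond each border.  Stability makes the first
--     # qualifying element in sorted order the earliest original element with the
--     # extremal qualifying x, matching A's strict-comparison tie-breaking.
--     row = ext_arr[0]
--     asc = sorted(row, key=lambda e: e[0])
--     desc = sorted(row, key=lambda e: e[0], reverse=True)
--     left_ext = next((e for e in asc if e[0] > border_left), None)
--     right_ext = next((e for e in desc if e[0] < border_right), None)
--     return left_ext, right_ext
-- ===== Notes on version B (the rewrite author's own statement) =====
-- stated objective: alternative
-- what changed: Replaced A's single-pass running min/max state machine with a sort-based method: stable-sort the row by x ascending and descending, then return the first element past each border; stability reproduces A's first-tie choice.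
import Mathlib
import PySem

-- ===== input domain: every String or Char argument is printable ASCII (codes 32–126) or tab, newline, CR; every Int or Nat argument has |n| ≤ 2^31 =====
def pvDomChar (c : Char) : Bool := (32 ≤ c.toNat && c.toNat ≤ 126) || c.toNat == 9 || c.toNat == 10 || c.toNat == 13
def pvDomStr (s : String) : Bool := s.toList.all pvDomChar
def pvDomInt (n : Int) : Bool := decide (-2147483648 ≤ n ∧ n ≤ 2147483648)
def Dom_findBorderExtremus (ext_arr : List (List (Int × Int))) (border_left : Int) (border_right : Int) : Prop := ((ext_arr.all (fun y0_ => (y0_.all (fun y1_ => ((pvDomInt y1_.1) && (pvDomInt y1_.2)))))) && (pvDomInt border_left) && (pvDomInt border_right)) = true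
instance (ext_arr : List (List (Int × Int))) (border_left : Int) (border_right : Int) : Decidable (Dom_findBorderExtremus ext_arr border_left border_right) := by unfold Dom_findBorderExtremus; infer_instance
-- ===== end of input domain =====

-- B replaces A's single-pass running min/max loop by stable sorts of the row (ascending and
-- descending on x) followed by taking the first element past each border; same return value.

-- ===== PORT A =====
-- one step of A's loop for the left_ext state
def stepLA (border_left : Int) (acc : Option (Int × Int)) (ext : Int × Int) : Option (Int × Int) :=
  if (decide (ext.1 > border_left) && (match acc with
      | none => true
      | some le => decide (le.1 > ext.1))) = true then some ext else acc

-- one step of A's loop for the right_ext state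
def stepRA (border_right : Int) (acc : Option (Int × Int)) (ext : Int × Int) : Option (Int × Int) :=
  if (decide (ext.1 < border_right) && (match acc with
      | none => true
      | some re => decide (re.1 < ext.1))) = true then some ext else acc

def findBorderExtremus (ext_arr : List (List (Int × Int))) (border_left : Int) (border_right : Int) : (Option (Int × Int)) × (Option (Int × Int)) :=
  match ext_arr with
  | [] => (none, none)  -- unreachable under Pre_: ext_arr[0] raises IndexError in Python
  | row :: _ =>
    row.foldl (fun st ext => (stepLA border_left st.1 ext, stepRA border_right st.2 ext)) (none, none)

-- ===== PORT B =====
def findBorderExtremus_alt (ext_arr : List (List (Int × Int))) (border_left : Int) (border_right : Int) : (Option (Int × Int)) × (Option (Int × Int)) :=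
  match ext_arr with
  | [] => (none, none)  -- unreachable under Pre_: ext_arr[0] raises IndexError in Python
  | row :: _ =>
    let asc := PySem.List.sorted row (fun e => e.1) false
    let desc := PySem.List.sorted row (fun e => e.1) true
    let left_ext := asc.find? (fun e => decide (e.1 > border_left))
    let right_ext := desc.find? (fun e => decide (e.1 < border_right))
    (left_ext, right_ext)

-- ===== PRECONDITION & SPEC =====
-- Pre_ excludes only the empty outer list, on which A's 'ext_arr[0]' raises IndexError (B raises there too).
def Pre_findBorderExtremus (ext_arr : List (List (Int × Int))) (border_left : Int) (border_right : Int) : Prop := ext_arr ≠ []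
instance (ext_arr : List (List (Int × Int))) (border_left : Int) (border_right : Int) : Decidable (Pre_findBorderExtremus ext_arr border_left border_right) := by unfold Pre_findBorderExtremus; infer_instance
def pvWitness_findBorderExtremus : (List (List (Int × Int))) × Int × Int := ([[(3, 4), (1, 2), (7, 0)]], 0, 1920)

def Spec_findBorderExtremus (ext_arr : List (List (Int × Int))) (border_left : Int) (border_right : Int) (out : (Option (Int × Int)) × (Option (Int × Int))) : Prop := out = findBorderExtremus_alt ext_arr border_left border_right
instance (ext_arr : List (List (Int × Int))) (border_left : Int) (border_right : Int) (out : (Option (Int × Int)) × (Option (Int × Int))) : Decidable (Spec_findBorderExtremus ext_arr border_left border_right out) := by unfold Spec_findBorderExtremus; infer_instance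

-- ===== CLAIM (what is proved, stated in full; the proofs are below) =====
def Claim_equal_findBorderExtremus : Prop := ∀ (ext_arr : List (List (Int × Int))) (border_left : Int) (border_right : Int), Dom_findBorderExtremus ext_arr border_left border_right → Pre_findBorderExtremus ext_arr border_left border_right → Spec_findBorderExtremus ext_arr border_left border_right (findBorderExtremus ext_arr border_left border_right)

-- ===== LEMMAS AND PROOFS =====

-- A's paired fold splits into the two independent folds.
lemma foldl_pair (bl br : Int) :
    ∀ (row : List (Int × Int)) (l r : Option (Int × Int)),
      row.foldl (fun st ext => (stepLA bl st.1 ext, stepRA br st.2 ext)) (l, r)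
        = (row.foldl (stepLA bl) l, row.foldl (stepRA br) r) := by
  intro row
  induction row with
  | nil => intro l r; rfl
  | cons x t ih => intro l r; simp [List.foldl, ih]

-- Ascending stable insertion preserves key-sortedness.
lemma pairwise_insertBy_le (x : Int × Int) :
    ∀ (l : List (Int × Int)), l.Pairwise (fun a b => a.1 ≤ b.1) →
      (PySem.List.insertBy (fun a b => decide (a.1 < b.1)) x l).Pairwise (fun a b => a.1 ≤ b.1) := by
  intro l
  induction l with
  | nil => intro _; simp [PySem.List.insertBy]
  | cons y t ih =>
    intro hl
    rw [List.pairwise_cons] at hl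
    obtain ⟨hy, ht⟩ := hl
    simp only [PySem.List.insertBy]
    split_ifs with h
    · simp only [decide_eq_true_eq] at h
      refine List.pairwise_cons.mpr ⟨?_, List.pairwise_cons.mpr ⟨hy, ht⟩⟩
      intro z hz
      rcases List.mem_cons.mp hz with rfl | hz
      · omega
      · have := hy z hz; omega
    · simp only [decide_eq_true_eq, not_lt] at h
      refine List.pairwise_cons.mpr ⟨?_, ih ht⟩
      intro z hz
      rcases (PySem.List.mem_insertBy _ _ _ _).mp hz with rfl | hz
      · exact h
      · exact hy z hz

-- Descending stable insertion preserves reverse key-sortedness.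
lemma pairwise_insertBy_ge (x : Int × Int) :
    ∀ (l : List (Int × Int)), l.Pairwise (fun a b => b.1 ≤ a.1) →
      (PySem.List.insertBy (fun a b => decide (b.1 < a.1)) x l).Pairwise (fun a b => b.1 ≤ a.1) := by
  intro l
  induction l with
  | nil => intro _; simp [PySem.List.insertBy]
  | cons y t ih =>
    intro hl
    rw [List.pairwise_cons] at hl
    obtain ⟨hy, ht⟩ := hl
    simp only [PySem.List.insertBy]
    split_ifs with h
    · simp only [decide_eq_true_eq] at h
      refine List.pairwise_cons.mpr ⟨?_, List.pairwise_cons.mpr ⟨hy, ht⟩⟩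
      intro z hz
      rcases List.mem_cons.mp hz with rfl | hz
      · omega
      · have := hy z hz; omega
    · simp only [decide_eq_true_eq, not_lt] at h
      refine List.pairwise_cons.mpr ⟨?_, ih ht⟩
      intro z hz
      rcases (PySem.List.mem_insertBy _ _ _ _).mp hz with rfl | hz
      · exact h
      · exact hy z hz

-- Inserting into an ascending-sorted list updates the first over-border element exactly as A's left step.
lemma find?_insertBy_left (bl : Int) (x : Int × Int) :
    ∀ (l : List (Int × Int)), l.Pairwise (fun a b => a.1 ≤ b.1) →
      (PySem.List.insertBy (fun a b => decide (a.1 < b.1)) x l).find? (fun e => decide (e.1 > bl))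
        = stepLA bl (l.find? (fun e => decide (e.1 > bl))) x := by
  intro l
  induction l with
  | nil =>
    intro _
    simp only [PySem.List.insertBy, stepLA]
    by_cases h : x.1 > bl <;> simp [List.find?, h]
  | cons y t ih =>
    intro hl
    rw [List.pairwise_cons] at hl
    obtain ⟨hy, ht⟩ := hl
    simp only [PySem.List.insertBy]
    split_ifs with h
    · -- x goes in front: x.1 < y.1
      simp only [decide_eq_true_eq] at h
      by_cases hx : x.1 > bl
      · -- x qualifies; any previously found element has key ≥ y.1 > x.1
        cases hacc : (y :: t).find? (fun e => decide (e.1 > bl)) with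
        | none => simp [List.find?_cons, stepLA, hacc, hx]
        | some f =>
          have hmem := List.mem_of_find?_eq_some hacc
          have hlt : x.1 < f.1 := by
            rcases List.mem_cons.mp hmem with rfl | hm
            · exact h
            · have := hy f hm; omega
          simp only [List.find?_cons] at hacc ⊢
          simp [hacc, stepLA, hx, hlt]
      · -- x does not qualify: it is skipped on both sides
        simp [List.find?_cons, stepLA, hx]
    · -- y stays in front: y.1 ≤ x.1
      simp only [decide_eq_true_eq, not_lt] at h
      by_cases hy' : y.1 > bl
      · -- y is found on both sides; A's step cannot replace it (y.1 ≤ x.1)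
        have hn : ¬ x.1 < y.1 := not_lt.mpr h
        simp [List.find?_cons, stepLA, hy', hn]
      · simp only [List.find?_cons]
        simp only [show decide (y.1 > bl) = false by simpa using hy']
        exact ih ht
-- Inserting into a descending-sorted list updates the first under-border element exactly as A's right step.
lemma find?_insertBy_right (br : Int) (x : Int × Int) :
    ∀ (l : List (Int × Int)), l.Pairwise (fun a b => b.1 ≤ a.1) →
      (PySem.List.insertBy (fun a b => decide (b.1 < a.1)) x l).find? (fun e => decide (e.1 < br))
        = stepRA br (l.find? (fun e => decide (e.1 < br))) x := by
  intro l
  induction l with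
  | nil =>
    intro _
    simp only [PySem.List.insertBy, stepRA]
    by_cases h : x.1 < br <;> simp [List.find?, h]
  | cons y t ih =>
    intro hl
    rw [List.pairwise_cons] at hl
    obtain ⟨hy, ht⟩ := hl
    simp only [PySem.List.insertBy]
    split_ifs with h
    · -- x goes in front: y.1 < x.1
      simp only [decide_eq_true_eq] at h
      by_cases hx : x.1 < br
      · cases hacc : (y :: t).find? (fun e => decide (e.1 < br)) with
        | none => simp [List.find?_cons, stepRA, hacc, hx]
        | some f =>
          have hmem := List.mem_of_find?_eq_some hacc
          have hlt : f.1 < x.1 := by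
            rcases List.mem_cons.mp hmem with rfl | hm
            · exact h
            · have := hy f hm; omega
          simp only [List.find?_cons] at hacc ⊢
          simp [hacc, stepRA, hx, hlt]
      · simp [List.find?_cons, stepRA, hx]
    · -- y stays in front: x.1 ≤ y.1
      simp only [decide_eq_true_eq, not_lt] at h
      by_cases hy' : y.1 < br
      · have hn : ¬ y.1 < x.1 := not_lt.mpr h
        simp [List.find?_cons, stepRA, hy', hn]
      · simp only [List.find?_cons]
        simp only [show decide (y.1 < br) = false by simpa using hy']
        exact ih ht
-- The first over-border element of the ascending stable sort is A's running left extremum.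
lemma find?_sorted_left (bl : Int) (row : List (Int × Int)) :
    (PySem.List.sorted row (fun e => e.1) false).find? (fun e => decide (e.1 > bl))
      = row.foldl (stepLA bl) none := by
  rw [PySem.List.sorted_eq_foldl_insertBy]
  suffices h : ∀ (xs : List (Int × Int)) (l : List (Int × Int)), l.Pairwise (fun a b => a.1 ≤ b.1) →
      (xs.foldl (fun acc x => PySem.List.insertBy (fun a b => decide (a.1 < b.1)) x acc) l).find?
          (fun e => decide (e.1 > bl))
        = xs.foldl (stepLA bl) (l.find? (fun e => decide (e.1 > bl))) by
    simpa using h row [] (by simp)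
  intro xs
  induction xs with
  | nil => intro l _; rfl
  | cons x t ih =>
    intro l hl
    simp only [List.foldl]
    rw [ih _ (pairwise_insertBy_le x l hl), find?_insertBy_left bl x l hl]

-- The first under-border element of the descending stable sort is A's running right extremum.
lemma find?_sorted_right (br : Int) (row : List (Int × Int)) :
    (PySem.List.sorted row (fun e => e.1) true).find? (fun e => decide (e.1 < br))
      = row.foldl (stepRA br) none := by
  rw [PySem.List.sorted_rev_eq_foldl_insertBy]
  suffices h : ∀ (xs : List (Int × Int)) (l : List (Int × Int)), l.Pairwise (fun a b => b.1 ≤ a.1) →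
      (xs.foldl (fun acc x => PySem.List.insertBy (fun a b => decide (b.1 < a.1)) x acc) l).find?
          (fun e => decide (e.1 < br))
        = xs.foldl (stepRA br) (l.find? (fun e => decide (e.1 < br))) by
    simpa using h row [] (by simp)
  intro xs
  induction xs with
  | nil => intro l _; rfl
  | cons x t ih =>
    intro l hl
    simp only [List.foldl]
    rw [ih _ (pairwise_insertBy_ge x l hl), find?_insertBy_right br x l hl]

-- ===== VERDICT (by name: the statement is the Claim_ definition above) =====
theorem findBorderExtremus_spec : Claim_equal_findBorderExtremus := by
  intro ext_arr bl br _ hpre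
  unfold Spec_findBorderExtremus
  cases ext_arr with
  | nil => exact absurd rfl hpre
  | cons row rest =>
    show (row.foldl (fun st ext => (stepLA bl st.1 ext, stepRA br st.2 ext)) (none, none)) = _
    rw [foldl_pair]
    unfold findBorderExtremus_alt
    simp only [find?_sorted_left, find?_sorted_right]
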